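/- GENERATED by c/gen_decode.py: decode facts of the image, one per distinct instruction byte string. -/
import UserX.DecodeImage

#decode_all Vorbis.Dec
  "0f28df"  -- movaps xmm3,xmm7
  "0f8480000000"  -- je 11498c
  "0f8520ffffff"  -- jne 10ccbd
  "0f8991feffff"  -- jns 110cad
  "0f8fc7010000"  -- jg 116105
  "0fb6d9"  -- movzx ebx,cl
  "39d0"  -- cmp eax,edx
  "410fb64602"  -- movzx eax,BYTE PTR [r14+0x2]
  "4169f548080000"  -- imul esi,r13d,0x848
  "41892f"  -- mov DWORD PTR [r15],ebp
  "418b8424e8060000"  -- mov eax,DWORD PTR [r12+0x6e8]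
  "41c7860800c00000000000"  -- mov DWORD PTR [r14+0xc00008],0x0
  "440fb62424"  -- movzx r12d,BYTE PTR [rsp]
  "4439f8"  -- cmp eax,r15d
  "4489742454"  -- mov DWORD PTR [rsp+0x54],r14d
  "448b23"  -- mov r12d,DWORD PTR [rbx]
  "448bb384000000"  -- mov r14d,DWORD PTR [rbx+0x84]
  "453b3e"  -- cmp r15d,DWORD PTR [r14]
  "458b6c24f8"  -- mov r13d,DWORD PTR [r12-0x8]
  "48036b18"  -- add rbp,QWORD PTR [rbx+0x18]
  "486395d0010000"  -- movsxd rdx,DWORD PTR [rbp+0x1d0]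
  "4883c301"  -- add rbx,0x1
  "488945b0"  -- mov QWORD PTR [rbp-0x50],rax
  "4889f7"  -- mov rdi,rsi
  "488b7c2410"  -- mov rdi,QWORD PTR [rsp+0x10]
  "488d3ceb"  -- lea rdi,[rbx+rbp*8]
  "488d7bc8"  -- lea rdi,[rbx-0x38]
  "488d9c24b0000000"  -- lea rbx,[rsp+0xb0]
  "488dbc9c80020000"  -- lea rdi,[rsp+rbx*4+0x280]
  "48c1e305"  -- shl rbx,0x5
  "490306"  -- add rax,QWORD PTR [r14]
  "49837e2000"  -- cmp QWORD PTR [r14+0x20],0x0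
  "498b9fd8010000"  -- mov rbx,QWORD PTR [r15+0x1d8]
  "498d7e1a"  -- lea rdi,[r14+0x1a]
  "49c7462800000000"  -- mov QWORD PTR [r14+0x28],0x0
  "4b8b44e508"  -- mov rax,QWORD PTR [r13+r12*8+0x8]
  "4c63ed"  -- movsxd r13,ebp
  "4c89fe"  -- mov rsi,r15
  "4c8d2c81"  -- lea r13,[rcx+rax*4]
  "4d63c0"  -- movsxd r8,r8d
  "4d8db520020000"  -- lea r14,[r13+0x220]
  "660f2fe1"  -- comisd xmm4,xmm1
  "66410f7ef5"  -- movd r13d,xmm6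
  "7212"  -- jb 11645a
  "7446"  -- je 10d787
  "7544"  -- jne 10cfb2
  "7a0d"  -- jp 102cfd
  "7e6a"  -- jle 111559
  "80bc24a400000065"  -- cmp BYTE PTR [rsp+0xa4],0x65
  "83c301"  -- add ebx,0x1
  "8944241c"  -- mov DWORD PTR [rsp+0x1c],eax
  "8985e4060000"  -- mov DWORD PTR [rbp+0x6e4],eax
  "8b442408"  -- mov eax,DWORD PTR [rsp+0x8]
  "8b74241c"  -- mov esi,DWORD PTR [rsp+0x1c]
  "8d2c36"  -- lea ebp,[rsi+rsi*1]
  "be00000000"  -- mov esi,0x0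
  "c6820000c000f9"  -- mov BYTE PTR [rdx+0xc00000],0xf9
  "c7838c00000000000000"  -- mov DWORD PTR [rbx+0x8c],0x0
  "e803a2feff"  -- call 1008e0
  "e80d53ffff"  -- call 100640
  "e817aefeff"  -- call 100560
  "e820bafeff"  -- call 1008e0
  "e82aacffff"  -- call 100640
  "e832fffeff"  -- call 103d00
  "e83eb5feff"  -- call 100300
  "e848b7feff"  -- call 100720
  "e8537affff"  -- call 100480
  "e85f8effff"  -- call 10d1c0
  "e86c40ffff"  -- call 108f20
  "e8777bffff"  -- call 100640
  "e882d3ffff"  -- call 100720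
  "e88dfcffff"  -- call 10e7a0
  "e89754ffff"  -- call 100800
  "e8a0f8ffff"  -- call 1025c0
  "e8abfbffff"  -- call 10c780
  "e8b4bfffff"  -- call 100300
  "e8bf7affff"  -- call 100640
  "e8c99efeff"  -- call 100720
  "e8d40affff"  -- call 100480
  "e8def8feff"  -- call 103d00
  "e8e7bbfeff"  -- call 100300
  "e8ef9effff"  -- call 100640
  "e8fa10ffff"  -- call 104d40
  "e924fcffff"  -- jmp 113b22
  "e969edffff"  -- jmp 113b22
  "e9c3f9ffff"  -- jmp 115f22
  "eb16"  -- jmp 104152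
  "eba7"  -- jmp 10d213
  "f20f1005fbd90100"  -- movsd xmm0,QWORD PTR [rip+0x1d9fb]
  "f20f5905c7d60100"  -- mulsd xmm0,QWORD PTR [rip+0x1d6c7]
  "f20f5ec2"  -- divsd xmm0,xmm2
  "f30f105c2438"  -- movss xmm3,DWORD PTR [rsp+0x38]
  "f30f111c24"  -- movss DWORD PTR [rsp],xmm3
  "f30f115c2418"  -- movss DWORD PTR [rsp+0x18],xmm3
  "f30f5805014a0100"  -- addss xmm0,DWORD PTR [rip+0x14a01]
  "f30f594544"  -- mulss xmm0,DWORD PTR [rbp+0x44]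
  "f30f5cc4"  -- subss xmm0,xmm4
  "f3410f110424"  -- movss DWORD PTR [r12],xmm0
  "ff13"  -- call QWORD PTR [rbx]
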